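-- pv_equiv track=rewrite | github.com/AlenniBoris/BSU-SixthTerm | DS_NN/09.02/3_1/3_1_3.py | taskA
-- ===== SOURCE A (Python) =====
-- def taskA(expr):
--     word_count = {}
--     words = expr.split()
--     result = []
--     for word in words:
--         if word in word_count:
--             word_count[word] += 1
--         else:
--             word_count[word] = 0
--         result.append(word_count[word])
--     return result
-- ===== SOURCE B (Python) =====
-- def taskA(expr):
--     words = expr.split()
--     return [words[:i].count(w) for i, w in enumerate(words)]
-- ===== Notes on version B (the rewrite author's own statement) =====
-- stated objective: simpler
-- what changed: Replaces the maintained running-count dict with a one-line comprehension that counts each word's occurrences in the prefix words[:i] via list.count.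
import Mathlib
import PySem

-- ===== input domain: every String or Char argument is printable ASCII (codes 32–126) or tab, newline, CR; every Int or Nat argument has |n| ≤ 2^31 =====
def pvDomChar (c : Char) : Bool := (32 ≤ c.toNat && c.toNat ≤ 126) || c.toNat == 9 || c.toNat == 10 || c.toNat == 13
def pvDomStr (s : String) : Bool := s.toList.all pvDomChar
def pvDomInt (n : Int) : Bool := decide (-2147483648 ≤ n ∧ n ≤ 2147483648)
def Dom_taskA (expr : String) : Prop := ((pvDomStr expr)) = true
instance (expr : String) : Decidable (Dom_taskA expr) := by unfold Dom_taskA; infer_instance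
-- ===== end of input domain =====

-- B replaces A's maintained running-count dict with a comprehension counting each word in its prefix (simpler).

-- ===== PORT A =====
-- one loop step: update the dict, then append word_count[word] read back from it
def taskA_step (s : PySem.Dict String Int × List Int) (w : String) :
    PySem.Dict String Int × List Int :=
  let d := if s.1.contains w then s.1.insert w (s.1.getD w 0 + 1) else s.1.insert w 0
  (d, s.2 ++ [d.getD w 0])

def taskA (expr : String) : List Int :=
  ((PySem.Str.split₀ expr).foldl taskA_step (PySem.Dict.empty, [])).2

-- ===== PORT B =====
def taskA_alt (expr : String) : List Int :=
  let words := PySem.Str.split₀ expr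
  (PySem.List.enumerate words 0).map
    (fun p => ((PySem.List.count (PySem.List.slice words none (some p.1)) p.2 : Nat) : Int))

-- ===== PRECONDITION & SPEC =====
def Spec_taskA (expr : String) (out : List Int) : Prop := out = taskA_alt expr
instance (expr : String) (out : List Int) : Decidable (Spec_taskA expr out) := by unfold Spec_taskA; infer_instance

-- ===== CLAIM (what is proved, stated in full; the proofs are below) =====
def Claim_equal_taskA : Prop := ∀ (expr : String), Dom_taskA expr → Spec_taskA expr (taskA expr)

-- ===== LEMMAS AND PROOFS =====

-- the values both sides produce: prefix counts, threaded as the growing prefix `pre`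
def pvVals (pre ws : List String) : List Int :=
  match ws with
  | [] => []
  | w :: ws => (pre.count w : Int) :: pvVals (pre ++ [w]) ws

theorem taskA_loop_eq (ws : List String) : ∀ (pre : List String) (d : PySem.Dict String Int)
    (res : List Int),
    (∀ v, (if d.contains v then d.getD v 0 + 1 else 0) = (pre.count v : Int)) →
    (ws.foldl taskA_step (d, res)).2 = res ++ pvVals pre ws := by
  induction ws with
  | nil => intro pre d res _; simp [pvVals]
  | cons w ws ih =>
    intro pre d res hd
    simp only [List.foldl_cons, pvVals]
    have hval : (taskA_step (d, res) w).1.getD w 0 = (pre.count w : Int) := by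
      have h := hd w
      by_cases hc : d.contains w = true
      · rw [if_pos hc] at h
        simp [taskA_step, hc, PySem.Dict.getD_insert_self]
        omega
      · rw [if_neg hc] at h
        simp [taskA_step, hc, PySem.Dict.getD_insert_self]
        omega
    have hstep : taskA_step (d, res) w =
        ((taskA_step (d, res) w).1, res ++ [(pre.count w : Int)]) := by
      simp only [taskA_step]
      by_cases hc : d.contains w = true <;> simp only [hc, if_true] <;>
        simp_all [taskA_step]
    rw [hstep, ih (pre ++ [w])]
    · simp
    · intro v
      by_cases hvw : v = w
      · subst hvw
        have hc1 : (taskA_step (d, res) v).1.contains v = true := by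
          simp only [taskA_step]
          by_cases hc : d.contains v = true <;>
            simp [hc]
        rw [hc1]
        simp only [if_true, hval]
        simp [List.count_append]
      · have hne : v ≠ w := hvw
        have hc2 : (taskA_step (d, res) w).1.contains v = d.contains v := by
          simp only [taskA_step]
          by_cases hc : d.contains w = true <;>
            simp [hc, PySem.Dict.contains_insert, hne]
        have hg2 : (taskA_step (d, res) w).1.getD v 0 = d.getD v 0 := by
          simp only [taskA_step]
          by_cases hc : d.contains w = true <;>
            simp [hc, PySem.Dict.getD_insert, hne]
        rw [hc2, hg2, hd v]
        simp [List.count_append, Ne.symm hne]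

theorem taskB_eq (ws : List String) : ∀ (pre rest : List String), ws = pre ++ rest →
    (PySem.List.enumerate rest (pre.length : Int)).map
      (fun p => ((PySem.List.count (PySem.List.slice ws none (some p.1)) p.2 : Nat) : Int))
      = pvVals pre rest := by
  intro pre rest
  induction rest generalizing pre with
  | nil => intro _; simp [pvVals, PySem.List.enumerate]
  | cons w rest ih =>
    intro hws
    rw [PySem.List.enumerate_cons, List.map_cons, pvVals]
    congr 1
    · rw [PySem.List.slice_to_natCast, PySem.List.count]
      rw [hws, List.take_left']
      rfl
    · have h1 : (pre.length : Int) + 1 = ((pre ++ [w]).length : Nat) := by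
        simp
      rw [h1, ih (pre ++ [w]) (by simp [hws])]

-- ===== VERDICT (by name: the statement is the Claim_ definition above) =====
theorem taskA_spec : Claim_equal_taskA := by
  intro expr _
  unfold Spec_taskA taskA taskA_alt
  rw [taskA_loop_eq (PySem.Str.split₀ expr) [] PySem.Dict.empty []
      (by intro v; simp [PySem.Dict.contains_empty])]
  rw [show ((0 : Int) = (([] : List String).length : Int)) by simp]
  rw [taskB_eq (PySem.Str.split₀ expr) [] (PySem.Str.split₀ expr) (by simp)]
  simp
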